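-- pv_equiv track=rewrite | github.com/benquick123/code-profiling | code/batch-2/vse-naloge-brez-testov/DN6-M-035.py | prestej_tvite
-- ===== SOURCE A (Python) =====
-- def prestej_tvite(tviti):
--     slovar = {}
--     vrednost=1
--     for tvit in tviti:
--         avtor = tvit.split(":")[0]
--         if avtor in slovar:
--             stevec = slovar[avtor]
--             stevec = stevec + 1
--             slovar.update({avtor:stevec})
--         else:
--             slovar.update({avtor:vrednost})
--     return(slovar)
-- ===== SOURCE B (Python) =====
-- def prestej_tvite(tviti):
--     skupine = {}
--     for tvit in tviti:
--         skupine.setdefault(tvit.split(":")[0], []).append(tvit)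
--     return {avtor: len(skupina) for avtor, skupina in skupine.items()}
-- ===== Notes on version B (the rewrite author's own statement) =====
-- stated objective: alternative
-- what changed: Instead of maintaining per-author running counters with an explicit membership branch, B groups the tweets into per-author lists via setdefault(...).append and then derives the counts as group lengths in a second comprehension pass.
import Mathlib
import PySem

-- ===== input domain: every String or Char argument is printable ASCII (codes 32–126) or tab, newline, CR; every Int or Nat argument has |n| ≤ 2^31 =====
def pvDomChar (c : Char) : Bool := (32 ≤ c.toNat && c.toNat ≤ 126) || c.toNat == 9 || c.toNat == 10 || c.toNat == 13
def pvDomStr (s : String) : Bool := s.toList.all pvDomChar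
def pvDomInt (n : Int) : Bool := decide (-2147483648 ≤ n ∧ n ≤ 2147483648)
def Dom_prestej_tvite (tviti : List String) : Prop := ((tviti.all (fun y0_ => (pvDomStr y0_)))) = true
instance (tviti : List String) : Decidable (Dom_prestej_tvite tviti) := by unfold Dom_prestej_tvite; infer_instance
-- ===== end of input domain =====

-- B replaces A's incremental counters by grouping tweets into per-author lists, then taking group lengths; objective: alternative (not faster).

-- t.split(":")[0] — split? with sep ":" ≠ "" is always some and nonempty, so getD/headD are exact
def pvAuthor (t : String) : String := ((PySem.Str.split? t ":").getD []).headD ""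

-- ===== PORT A =====
def prestej_tvite (tviti : List String) : List (String × Int) :=
  (tviti.foldl (fun slovar tvit =>
      let avtor := pvAuthor tvit
      if slovar.contains avtor then
        let stevec := slovar.getD avtor 0      -- slovar[avtor]: key present, getD is exact
        slovar.insert avtor (stevec + 1)
      else
        slovar.insert avtor 1)
    (PySem.Dict.empty : PySem.Dict String Int)).items

-- ===== PORT B =====
def prestej_tvite_alt (tviti : List String) : List (String × Int) :=
  -- skupine.setdefault(k, []).append(tvit) mutates the stored list: = modify k [] (· ++ [tvit])
  let skupine := tviti.foldl
    (fun d tvit => d.modify (pvAuthor tvit) [] (fun g => g ++ [tvit]))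
    (PySem.Dict.empty : PySem.Dict String (List String))
  skupine.items.map (fun p => (p.1, (p.2.length : Int)))

-- ===== PRECONDITION & SPEC =====
def Spec_prestej_tvite (tviti : List String) (out : List (String × Int)) : Prop := out = prestej_tvite_alt tviti
instance (tviti : List String) (out : List (String × Int)) : Decidable (Spec_prestej_tvite tviti out) := by unfold Spec_prestej_tvite; infer_instance

-- ===== CLAIM (what is proved, stated in full; the proofs are below) =====
def Claim_equal_prestej_tvite : Prop := ∀ (tviti : List String), Dom_prestej_tvite tviti → Spec_prestej_tvite tviti (prestej_tvite tviti)

-- ===== LEMMAS AND PROOFS =====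

-- A's loop body is, in both branches, 'insert key (getD key 0 + 1)'
theorem pvStepEq (d : PySem.Dict String Int) (t : String) :
    (let avtor := pvAuthor t
     if d.contains avtor then
       let stevec := d.getD avtor 0
       d.insert avtor (stevec + 1)
     else d.insert avtor 1)
    = d.insert (pvAuthor t) (d.getD (pvAuthor t) 0 + 1) := by
  by_cases h : d.contains (pvAuthor t) = true
  · simp [h]
  · have h0 : d.getD (pvAuthor t) 0 = 0 := by
      have hc := PySem.Dict.contains_eq_isSome_get? d (pvAuthor t)
      simp only [Bool.not_eq_true] at h
      rw [h] at hc
      cases hg : d.get? (pvAuthor t) with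
      | none => simp [PySem.Dict.getD, hg]
      | some v => rw [hg] at hc; simp at hc
    simp [h, h0]

theorem prestej_tvite_spec' (tviti : List String) :
    prestej_tvite tviti = prestej_tvite_alt tviti := by
  unfold prestej_tvite prestej_tvite_alt
  dsimp only
  have h1 : (tviti.foldl (fun slovar tvit =>
      let avtor := pvAuthor tvit
      if slovar.contains avtor then
        let stevec := slovar.getD avtor 0
        slovar.insert avtor (stevec + 1)
      else slovar.insert avtor 1)
      (PySem.Dict.empty : PySem.Dict String Int))
      = PySem.Dict.counter (tviti.map pvAuthor) := by
    rw [← PySem.Dict.foldl_insert_getD_add_one_eq_counter]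
    rw [List.foldl_map]
    exact PySem.List.foldl_congr_mem tviti _ _ _ (fun d t _ => pvStepEq d t)
  rw [h1, PySem.Dict.items_counter]
  have hnd : (tviti.foldl
      (fun d tvit => d.modify (pvAuthor tvit) [] (fun g => g ++ [tvit]))
      (PySem.Dict.empty : PySem.Dict String (List String))).keys.Nodup :=
    PySem.Dict.nodup_keys_foldl_modify_key tviti pvAuthor [] _ _ (by simp [PySem.Dict.keys_empty])
  have hkeys : (tviti.foldl
      (fun d tvit => d.modify (pvAuthor tvit) [] (fun g => g ++ [tvit]))
      (PySem.Dict.empty : PySem.Dict String (List String))).keys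
      = PySem.Set.ofList (tviti.map pvAuthor) := by
    rw [PySem.Dict.keys_foldl_modify_key]
    simp [PySem.Dict.keys_empty, PySem.Set.update_nil_left]
  have hget : ∀ c, (tviti.foldl
      (fun d tvit => d.modify (pvAuthor tvit) [] (fun g => g ++ [tvit]))
      (PySem.Dict.empty : PySem.Dict String (List String))).getD c []
      = tviti.filter (fun t => pvAuthor t == c) := by
    intro c
    have := PySem.Dict.getD_foldl_modify_append
      (l := tviti.map (fun t => (pvAuthor t, t)))
      (d := (PySem.Dict.empty : PySem.Dict String (List String))) (c := c)
    rw [List.foldl_map] at this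
    rw [this]
    simp [List.filter_map, List.map_map, Function.comp_def]
  rw [PySem.Dict.items_eq_map_keys _ hnd [], hkeys, List.map_map]
  refine List.map_congr_left (fun a _ => ?_)
  simp [Function.comp, hget a, List.count_eq_countP,
        List.countP_eq_length_filter, List.filter_map]
  rfl

-- ===== VERDICT (by name: the statement is the Claim_ definition above) =====
theorem prestej_tvite_spec : Claim_equal_prestej_tvite := by
  intro tviti _
  exact prestej_tvite_spec' tviti
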